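-- pv_equiv track=rewrite | github.com/ppg5018/VyaaparAI | app/services/competitor_preview.py | _compute_review_buckets
-- ===== SOURCE A (Python) =====
-- REVIEW_THRESHOLDS = [5, 20, 50, 100, 200]
--
-- def _compute_review_buckets(candidates: list[dict]) -> dict[str, int]:
--     """Count how many candidates clear each review-count threshold."""
--     buckets: dict[str, int] = {f"{t}+": 0 for t in REVIEW_THRESHOLDS}
--     for c in candidates:
--         rc = c.get("review_count", 0) or 0
--         for t in REVIEW_THRESHOLDS:
--             if rc >= t:
--                 buckets[f"{t}+"] += 1
--     return buckets
-- ===== SOURCE B (Python) =====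
-- REVIEW_THRESHOLDS = [5, 20, 50, 100, 200]
--
-- def _compute_review_buckets(candidates):
--     """Tally each candidate into its single highest cleared bucket, then suffix-sum."""
--     n = len(REVIEW_THRESHOLDS)
--     tallies = [0] * (n + 1)
--     for c in candidates:
--         rc = c.get("review_count", 0) or 0
--         k = 0
--         while k < n and rc >= REVIEW_THRESHOLDS[k]:
--             k += 1
--         tallies[k] += 1
--     suffix = [0] * (n + 2)
--     for i in range(n, -1, -1):
--         suffix[i] = suffix[i + 1] + tallies[i]
--     return {f"{t}+": suffix[i + 1] for i, t in enumerate(REVIEW_THRESHOLDS)}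
-- ===== Notes on version B (the rewrite author's own statement) =====
-- stated objective: alternative
-- what changed: Instead of incrementing every cleared threshold bucket per candidate, B tallies each candidate once into its single highest cleared bucket (early-exit while loop) and derives the five buckets by a suffix sum over the six tallies.
import Mathlib
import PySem

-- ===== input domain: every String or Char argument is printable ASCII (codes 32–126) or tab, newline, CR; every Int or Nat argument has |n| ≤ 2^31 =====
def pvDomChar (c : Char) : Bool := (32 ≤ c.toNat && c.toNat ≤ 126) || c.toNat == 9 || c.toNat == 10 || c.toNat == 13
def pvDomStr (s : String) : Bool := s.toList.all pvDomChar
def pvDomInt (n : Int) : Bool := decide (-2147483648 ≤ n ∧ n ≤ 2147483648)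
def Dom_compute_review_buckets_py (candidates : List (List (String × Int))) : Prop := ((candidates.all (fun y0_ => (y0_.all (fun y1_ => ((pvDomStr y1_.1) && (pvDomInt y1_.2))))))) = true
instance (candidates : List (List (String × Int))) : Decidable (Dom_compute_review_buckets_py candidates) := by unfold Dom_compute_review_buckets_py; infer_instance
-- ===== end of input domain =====

-- B tallies each candidate once into its highest cleared bucket and suffix-sums the tallies
-- (one bucket update per candidate instead of up to five dict increments); objective: alternative.


def pvThresholds : List Int := [5, 20, 50, 100, 200]

-- rc = c.get("review_count", 0) or 0  (shared line of both Pythons)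
def pvRc (c : List (String × Int)) : Int :=
  let v := PySem.Dict.getD (PySem.Dict.mk c) "review_count" 0
  if v ≠ 0 then v else 0

-- ===== PORT A =====
def compute_review_buckets_py (candidates : List (List (String × Int))) : List (String × Int) :=
  let buckets : PySem.Dict String Int :=
    pvThresholds.foldl (fun d t => d.insert (PySem.Int.toStr t ++ "+") 0) PySem.Dict.empty
  let buckets := candidates.foldl (fun d c =>
    let rc := pvRc c
    pvThresholds.foldl (fun d t =>
      if rc ≥ t then d.modify (PySem.Int.toStr t ++ "+") 0 (· + 1) else d) d) buckets
  buckets.items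

-- ===== PORT B =====
-- tallies[k] += 1  (k found by the while loop)
def pvBumpAt : List Int → Nat → List Int
  | [], _ => []
  | x :: xs, 0 => (x + 1) :: xs
  | x :: xs, Nat.succ k => x :: pvBumpAt xs k

-- while k < n and rc >= REVIEW_THRESHOLDS[k]: k += 1
def pvClearCount (rc : Int) : List Int → Nat
  | [] => 0
  | t :: ts => if rc ≥ t then 1 + pvClearCount rc ts else 0

-- suffix[i] = suffix[i+1] + tallies[i]  (built back-to-front; trailing 0 = suffix[n+1])
def pvSuffixSums : List Int → List Int
  | [] => [0]
  | x :: xs => (x + (pvSuffixSums xs).headI) :: pvSuffixSums xs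

def compute_review_buckets_py_alt (candidates : List (List (String × Int))) : List (String × Int) :=
  let tallies := candidates.foldl (fun tal c =>
      pvBumpAt tal (pvClearCount (pvRc c) pvThresholds))
    (List.replicate (pvThresholds.length + 1) 0)
  List.zipWith (fun t s => (PySem.Int.toStr t ++ "+", s)) pvThresholds (pvSuffixSums tallies).tail

-- ===== PRECONDITION & SPEC =====
def Spec_compute_review_buckets_py (candidates : List (List (String × Int))) (out : List (String × Int)) : Prop := out = compute_review_buckets_py_alt candidates
instance (candidates : List (List (String × Int))) (out : List (String × Int)) : Decidable (Spec_compute_review_buckets_py candidates out) := by unfold Spec_compute_review_buckets_py; infer_instance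

-- ===== CLAIM (what is proved, stated in full; the proofs are below) =====
def Claim_equal_compute_review_buckets_py : Prop := ∀ (candidates : List (List (String × Int))), Dom_compute_review_buckets_py candidates → Spec_compute_review_buckets_py candidates (compute_review_buckets_py candidates)

-- ===== LEMMAS AND PROOFS =====

def pvCnt (t : Int) (cs : List (List (String × Int))) : Int :=
  (cs.countP (fun c => decide (t ≤ pvRc c)) : Int)

def pvEk (k : Nat) (cs : List (List (String × Int))) : Int :=
  (cs.countP (fun c => pvClearCount (pvRc c) pvThresholds == k) : Int)

lemma pvKey5 : PySem.Int.toStr (5:Int) ++ "+" = "5+" := by decide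
lemma pvKey20 : PySem.Int.toStr (20:Int) ++ "+" = "20+" := by decide
lemma pvKey50 : PySem.Int.toStr (50:Int) ++ "+" = "50+" := by decide
lemma pvKey100 : PySem.Int.toStr (100:Int) ++ "+" = "100+" := by decide
lemma pvKey200 : PySem.Int.toStr (200:Int) ++ "+" = "200+" := by decide

lemma pvStepA_eq (rc a b c d e : Int) :
    pvThresholds.foldl (fun d t =>
      if rc ≥ t then d.modify (PySem.Int.toStr t ++ "+") 0 (· + 1) else d)
      (PySem.Dict.mk [("5+",a),("20+",b),("50+",c),("100+",d),("200+",e)])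
    = PySem.Dict.mk
        [("5+", a + if 5 ≤ rc then 1 else 0), ("20+", b + if 20 ≤ rc then 1 else 0),
         ("50+", c + if 50 ≤ rc then 1 else 0), ("100+", d + if 100 ≤ rc then 1 else 0),
         ("200+", e + if 200 ≤ rc then 1 else 0)] := by
  simp only [pvThresholds, List.foldl_cons, List.foldl_nil, pvKey5, pvKey20, pvKey50,
    pvKey100, pvKey200]
  split_ifs <;>
    simp [PySem.Dict.modify, PySem.Dict.insert, PySem.Dict.getD, PySem.Dict.get?,
      PySem.Dict.contains]

lemma pvFoldA_eq (cs : List (List (String × Int))) : ∀ (a b c d e : Int),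
    cs.foldl (fun d c =>
      pvThresholds.foldl (fun d t =>
        if pvRc c ≥ t then d.modify (PySem.Int.toStr t ++ "+") 0 (· + 1) else d) d)
      (PySem.Dict.mk [("5+",a),("20+",b),("50+",c),("100+",d),("200+",e)])
    = PySem.Dict.mk
        [("5+", a + pvCnt 5 cs), ("20+", b + pvCnt 20 cs), ("50+", c + pvCnt 50 cs),
         ("100+", d + pvCnt 100 cs), ("200+", e + pvCnt 200 cs)] := by
  induction cs with
  | nil => intro a b c d e; simp [pvCnt]
  | cons hd tl ih =>
      intro a b c d e
      simp only [List.foldl_cons, pvStepA_eq, ih]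
      simp only [pvCnt, List.countP_cons, PySem.Dict.mk.injEq, List.cons.injEq,
        Prod.mk.injEq, true_and, and_true]
      refine ⟨?_, ?_, ?_, ?_, ?_⟩ <;> · split_ifs <;> simp_all <;> omega

lemma pvClear_eq (rc : Int) : pvClearCount rc pvThresholds =
    if 200 ≤ rc then 5 else if 100 ≤ rc then 4 else if 50 ≤ rc then 3
    else if 20 ≤ rc then 2 else if 5 ≤ rc then 1 else 0 := by
  simp only [pvThresholds, pvClearCount, ge_iff_le]
  split_ifs <;> omega

lemma pvEk_cons (k : Nat) (hd : List (String × Int)) (tl : List (List (String × Int))) :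
    pvEk k (hd :: tl) = (if pvClearCount (pvRc hd) pvThresholds = k then 1 else 0) + pvEk k tl := by
  simp only [pvEk, List.countP_cons, beq_iff_eq]
  split_ifs <;> push_cast <;> omega

lemma pvCnt_cons (t : Int) (hd : List (String × Int)) (tl : List (List (String × Int))) :
    pvCnt t (hd :: tl) = (if t ≤ pvRc hd then 1 else 0) + pvCnt t tl := by
  simp only [pvCnt, List.countP_cons, decide_eq_true_eq]
  split_ifs <;> push_cast <;> omega

lemma pvFoldB_eq (cs : List (List (String × Int))) : ∀ (u0 u1 u2 u3 u4 u5 : Int),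
    cs.foldl (fun tal c => pvBumpAt tal (pvClearCount (pvRc c) pvThresholds))
      [u0, u1, u2, u3, u4, u5]
    = [u0 + pvEk 0 cs, u1 + pvEk 1 cs, u2 + pvEk 2 cs,
       u3 + pvEk 3 cs, u4 + pvEk 4 cs, u5 + pvEk 5 cs] := by
  induction cs with
  | nil => intro u0 u1 u2 u3 u4 u5; simp [pvEk]
  | cons hd tl ih =>
      intro u0 u1 u2 u3 u4 u5
      simp only [List.foldl_cons]
      have hcl := pvClear_eq (pvRc hd)
      split_ifs at hcl <;>
        · rw [hcl]
          simp only [pvBumpAt, ih, pvEk_cons, hcl, List.cons.injEq]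
          refine ⟨?_, ?_, ?_, ?_, ?_, ?_⟩ <;> (norm_num; try omega)

lemma pvSuffix_eq (cs : List (List (String × Int))) :
    (pvEk 1 cs + pvEk 2 cs + pvEk 3 cs + pvEk 4 cs + pvEk 5 cs = pvCnt 5 cs) ∧
    (pvEk 2 cs + pvEk 3 cs + pvEk 4 cs + pvEk 5 cs = pvCnt 20 cs) ∧
    (pvEk 3 cs + pvEk 4 cs + pvEk 5 cs = pvCnt 50 cs) ∧
    (pvEk 4 cs + pvEk 5 cs = pvCnt 100 cs) ∧
    (pvEk 5 cs = pvCnt 200 cs) := by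
  induction cs with
  | nil => simp [pvEk, pvCnt]
  | cons hd tl ih =>
      obtain ⟨i1, i2, i3, i4, i5⟩ := ih
      have hcl := pvClear_eq (pvRc hd)
      split_ifs at hcl <;>
        · simp only [pvEk_cons, pvCnt_cons, hcl]
          refine ⟨?_, ?_, ?_, ?_, ?_⟩ <;> (norm_num; split_ifs <;> omega)

-- ===== VERDICT (by name: the statement is the Claim_ definition above) =====
theorem compute_review_buckets_py_spec : Claim_equal_compute_review_buckets_py := by
  intro cs _
  unfold Spec_compute_review_buckets_py compute_review_buckets_py compute_review_buckets_py_alt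
  obtain ⟨s1, s2, s3, s4, s5⟩ := pvSuffix_eq cs
  show (cs.foldl (fun d c =>
      pvThresholds.foldl (fun d t =>
        if pvRc c ≥ t then d.modify (PySem.Int.toStr t ++ "+") 0 (· + 1) else d) d)
      (PySem.Dict.mk [("5+",0),("20+",0),("50+",0),("100+",0),("200+",0)])).items
    = List.zipWith (fun t s => (PySem.Int.toStr t ++ "+", s)) pvThresholds
        (pvSuffixSums (cs.foldl (fun tal c => pvBumpAt tal (pvClearCount (pvRc c) pvThresholds))
          [0, 0, 0, 0, 0, 0])).tail
  rw [pvFoldA_eq, pvFoldB_eq]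
  simp only [pvSuffixSums, List.headI, List.tail, pvThresholds,
    List.zipWith, pvKey5, pvKey20, pvKey50, pvKey100, pvKey200, List.cons.injEq,
    Prod.mk.injEq, true_and, and_true]
  refine ⟨?_, ?_, ?_, ?_, ?_⟩ <;> omega
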